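-- pv_equiv track=rewrite | github.com/loveAlakazam/Sneaking_Algorithm | quiz1.py | solution
-- ===== SOURCE A (Python) =====
-- def solution(a, b):
--     '''
--     나눠서 나머지가
--     1:금
--     2:토
--     3:일
--     4:월
--     5:화
--     6:수
--     0:목
--     '''
--     weekDay={0:'THU', 1:'FRI', 2:'SAT', 3:'SUN', 4:'MON', 5:'TUE', 6:'WED'}
--     MonthDay=[0,31,29,31,30,31,30,31,31,30,31,30,31]
--     days=0
--     #a월이 5월이라면 1~4월까지 전체요일 계산
--     for x in range(0,a):
--         days+=MonthDay[x]
--     days += b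
--     days %=7
--     return weekDay[days]
-- ===== SOURCE B (Python) =====
-- _DAYS_BEFORE = [0, 31, 60, 91, 121, 152, 182, 213, 244, 274, 305, 335, 366]
-- _WEEK = ['THU', 'FRI', 'SAT', 'SUN', 'MON', 'TUE', 'WED']
--
--
-- def solution(a, b):
--     # day-of-year of day b of month a (leap year), mapped to a weekday name
--     return _WEEK[(_DAYS_BEFORE[a - 1] + b) % 7]
-- ===== Notes on version B (the rewrite author's own statement) =====
-- stated objective: simpler
-- what changed: Replaces the month-summation loop and the weekday dict with a precomputed cumulative-days table and a weekday-name list, one lookup each; Pre_ restricts to actual month numbers 1..13, excluding a<=0 (not a month), where A's empty loop yields the weekday of b alone and B's negative table index wraps or raises - a corner neither value is specified for.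
-- outside the precondition, e.g. on solution(0, 1): A returns 'FRI', B returns 'SUN'; on solution(-20, 3): A returns 'SUN', B raises IndexError
import Mathlib
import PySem

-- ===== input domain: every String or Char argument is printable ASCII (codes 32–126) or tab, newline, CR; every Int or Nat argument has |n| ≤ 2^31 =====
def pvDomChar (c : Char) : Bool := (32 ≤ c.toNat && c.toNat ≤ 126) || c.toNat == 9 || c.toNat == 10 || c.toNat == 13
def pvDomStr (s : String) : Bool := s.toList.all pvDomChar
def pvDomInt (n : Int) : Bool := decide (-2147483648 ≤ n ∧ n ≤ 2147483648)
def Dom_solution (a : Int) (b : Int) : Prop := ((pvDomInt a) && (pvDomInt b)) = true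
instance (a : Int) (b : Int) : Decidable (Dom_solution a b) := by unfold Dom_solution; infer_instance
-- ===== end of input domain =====

-- B replaces A's summation loop and weekday dict by a cumulative-days table and a name list, one lookup each (objective: simpler).

-- ===== PORT A =====
def solution (a : Int) (b : Int) : String :=
  let weekDay : PySem.Dict Int String :=
    PySem.Dict.ofList [(0, "THU"), (1, "FRI"), (2, "SAT"), (3, "SUN"), (4, "MON"), (5, "TUE"), (6, "WED")]
  let monthDay : List Int := [0, 31, 29, 31, 30, 31, 30, 31, 31, 30, 31, 30, 31]
  -- for x in range(0, a): days += MonthDay[x]   (pyGetD: in range under Pre_solution)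
  let days : Int := (PySem.List.pyRange 0 a 1).foldl (fun d x => d + PySem.List.pyGetD monthDay x 0) 0
  let days := days + b
  let days := PySem.Int.mod days 7
  weekDay.getD days ""

-- ===== PORT B =====
def daysBefore : List Int := [0, 31, 60, 91, 121, 152, 182, 213, 244, 274, 305, 335, 366]
def weekNames : List String := ["THU", "FRI", "SAT", "SUN", "MON", "TUE", "WED"]

def solution_alt (a : Int) (b : Int) : String :=
  PySem.List.pyGetD weekNames
    (PySem.Int.mod (PySem.List.pyGetD daysBefore (a - 1) 0 + b) 7) ""

-- ===== PRECONDITION & SPEC =====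
-- Pre_ restricts to actual month numbers 1..13: for a >= 14 A raises IndexError, and for a <= 0
-- (not a month) A's empty loop yields the weekday of b alone while B's negative index wraps or
-- raises - a corner neither value is specified for.
def Pre_solution (a : Int) (b : Int) : Prop := 1 ≤ a ∧ a ≤ 13
instance (a : Int) (b : Int) : Decidable (Pre_solution a b) := by unfold Pre_solution; infer_instance
def pvWitness_solution : Int × Int := (5, 24)

def Spec_solution (a : Int) (b : Int) (out : String) : Prop := out = solution_alt a b
instance (a : Int) (b : Int) (out : String) : Decidable (Spec_solution a b out) := by unfold Spec_solution; infer_instance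

-- ===== CLAIM (what is proved, stated in full; the proofs are below) =====
def Claim_equal_solution : Prop := ∀ (a : Int) (b : Int), Dom_solution a b → Pre_solution a b → Spec_solution a b (solution a b)

-- ===== LEMMAS AND PROOFS =====

-- the dict lookup of A and the list lookup of B agree on every residue 0..6
theorem lookup_eq (r : Int) (h0 : 0 ≤ r) (h7 : r < 7) :
    (PySem.Dict.ofList [(0, "THU"), (1, "FRI"), (2, "SAT"), (3, "SUN"), (4, "MON"), (5, "TUE"), (6, "WED")] :
      PySem.Dict Int String).getD r "" = PySem.List.pyGetD weekNames r "" := by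
  interval_cases r <;> rfl

-- A's loop sum over months before a equals B's table entry at a-1, for 1 ≤ a ≤ 13
theorem sum_eq_cum (a : Int) (h1 : 1 ≤ a) (h13 : a ≤ 13) :
    (PySem.List.pyRange 0 a 1).foldl
      (fun d x => d + PySem.List.pyGetD ([0, 31, 29, 31, 30, 31, 30, 31, 31, 30, 31, 30, 31] : List Int) x 0) 0
      = PySem.List.pyGetD daysBefore (a - 1) 0 := by
  interval_cases a <;> decide

-- ===== VERDICT (by name: the statement is the Claim_ definition above) =====
theorem solution_spec : Claim_equal_solution := by
  intro a b _ hpre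
  show solution a b = solution_alt a b
  simp only [solution, solution_alt]
  rw [sum_eq_cum a hpre.1 hpre.2]
  exact lookup_eq _ (PySem.Int.mod_nonneg _ (by omega)) (PySem.Int.mod_lt _ (by omega))
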